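-- pv_equiv track=rewrite | github.com/sirenescx/leetcode-python | valid_sudoku.py | isSubBoxOk
-- ===== SOURCE A (Python) =====
-- from typing import List
--
-- def isSubBoxOk(matrix: List[List[str]], r_s: int, c_s: int, r_e: int, c_e: int) -> bool:
--     counter: dict = {}
--
--     for i in range(r_s, r_e):
--         for j in range(c_s, c_e):
--             val: str = matrix[i][j]
--             if val != '.':
--                 if val in counter:
--                     return False
--                 counter[val] = 1
--
--     return True
-- ===== SOURCE B (Python) =====
-- def isSubBoxOk(matrix, r_s, c_s, r_e, c_e):
--     # No auxiliary dict/set: each non-'.' cell is checked against all cells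
--     # that precede it in the traversal by a direct rescan (pairwise check).
--     def dup_before(i, j, val):
--         return any(matrix[p][q] == val
--                    for p in range(r_s, i + 1)
--                    for q in range(c_s, c_e if p < i else j))
--
--     for i in range(r_s, r_e):
--         for j in range(c_s, c_e):
--             val = matrix[i][j]
--             if val != '.' and dup_before(i, j, val):
--                 return False
--     return True
-- ===== Notes on version B (the rewrite author's own statement) =====
-- stated objective: alternative
-- what changed: A maintains a seen-dict while scanning the sub-box once; B keeps no auxiliary structure at all and instead, at each non-'.' cell, rescans every earlier cell of the traversal for an equal value (pairwise duplicate check), returning False at the first repeat.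
-- outside the precondition, e.g. on isSubBoxOk([['1', '1']], 0, 0, 2, 2): A returns False, B returns False
import Mathlib
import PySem

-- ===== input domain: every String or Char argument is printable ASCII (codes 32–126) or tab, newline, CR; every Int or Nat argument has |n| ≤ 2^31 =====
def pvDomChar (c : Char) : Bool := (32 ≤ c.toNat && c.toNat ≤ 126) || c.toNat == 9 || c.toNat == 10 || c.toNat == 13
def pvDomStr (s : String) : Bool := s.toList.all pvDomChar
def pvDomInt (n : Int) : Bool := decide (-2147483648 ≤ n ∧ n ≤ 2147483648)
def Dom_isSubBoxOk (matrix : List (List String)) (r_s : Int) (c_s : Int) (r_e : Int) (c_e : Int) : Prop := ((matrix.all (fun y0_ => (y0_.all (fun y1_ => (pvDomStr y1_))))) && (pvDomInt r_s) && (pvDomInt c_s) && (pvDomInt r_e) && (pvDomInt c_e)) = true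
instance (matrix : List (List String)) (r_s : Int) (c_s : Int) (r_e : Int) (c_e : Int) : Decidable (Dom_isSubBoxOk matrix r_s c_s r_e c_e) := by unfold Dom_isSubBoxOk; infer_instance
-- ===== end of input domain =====

-- B keeps no seen-dict: each non-'.' cell is checked by rescanning all earlier
-- cells of the traversal for an equal value (objective: alternative algorithm).

-- ===== PORT A =====
-- inner 'for j' loop: none = the 'return False' path, some d = updated counter
def aInner (row : List String) (js : List Int) (d : PySem.Dict String Int) :
    Option (PySem.Dict String Int) :=
  match js with
  | [] => some d
  | j :: js' =>
    let val := PySem.List.pyGetD row j "."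
    if val ≠ "." then
      if d.contains val then none
      else aInner row js' (d.insert val 1)
    else aInner row js' d

-- outer 'for i' loop
def aOuter (matrix : List (List String)) (c_s c_e : Int) (is : List Int)
    (d : PySem.Dict String Int) : Bool :=
  match is with
  | [] => true
  | i :: is' =>
    match aInner (PySem.List.pyGetD matrix i []) (PySem.List.pyRange c_s c_e 1) d with
    | none => false
    | some d' => aOuter matrix c_s c_e is' d'

def isSubBoxOk (matrix : List (List String)) (r_s : Int) (c_s : Int) (r_e : Int) (c_e : Int) : Bool :=
  aOuter matrix c_s c_e (PySem.List.pyRange r_s r_e 1) PySem.Dict.empty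

-- ===== PORT B =====
-- matrix[p][q]
def cellVal (matrix : List (List String)) (p q : Int) : String :=
  PySem.List.pyGetD (PySem.List.pyGetD matrix p []) q "."

-- dup_before(i, j, val): any(matrix[p][q] == val ...)
def dupBefore (matrix : List (List String)) (r_s c_s c_e i j : Int) (val : String) : Bool :=
  (PySem.List.pyRange r_s (i + 1) 1).any (fun p =>
    (PySem.List.pyRange c_s (if p < i then c_e else j) 1).any (fun q =>
      cellVal matrix p q == val))

-- inner 'for j' loop of B
def bInner (matrix : List (List String)) (r_s c_s c_e i : Int) (js : List Int) : Bool :=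
  match js with
  | [] => true
  | j :: js' =>
    let val := cellVal matrix i j
    if (val != ".") && dupBefore matrix r_s c_s c_e i j val then false
    else bInner matrix r_s c_s c_e i js'

-- outer 'for i' loop of B
def bOuter (matrix : List (List String)) (r_s c_s c_e : Int) (is : List Int) : Bool :=
  match is with
  | [] => true
  | i :: is' =>
    if bInner matrix r_s c_s c_e i (PySem.List.pyRange c_s c_e 1) then
      bOuter matrix r_s c_s c_e is'
    else false

def isSubBoxOk_alt (matrix : List (List String)) (r_s : Int) (c_s : Int) (r_e : Int) (c_e : Int) : Bool :=
  bOuter matrix r_s c_s c_e (PySem.List.pyRange r_s r_e 1)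

-- ===== PRECONDITION & SPEC =====
-- Pre_ excludes inputs where some sub-box index is out of range (Python IndexError);
-- on a few such inputs both A and B still return False by hitting a duplicate before
-- the first bad cell, but the whole out-of-range region is excluded uniformly.
def Pre_isSubBoxOk (matrix : List (List String)) (r_s : Int) (c_s : Int) (r_e : Int) (c_e : Int) : Prop :=
  r_e ≤ r_s ∨ c_e ≤ c_s ∨
    (-(matrix.length : Int) ≤ r_s ∧ r_e ≤ (matrix.length : Int) ∧
      ∀ p ∈ matrix.zipIdx,
        ((r_s ≤ (p.2 : Int) ∧ (p.2 : Int) < r_e) ∨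
         (r_s ≤ (p.2 : Int) - (matrix.length : Int) ∧ (p.2 : Int) - (matrix.length : Int) < r_e)) →
        (-(p.1.length : Int) ≤ c_s ∧ c_e ≤ (p.1.length : Int)))
instance (matrix : List (List String)) (r_s : Int) (c_s : Int) (r_e : Int) (c_e : Int) : Decidable (Pre_isSubBoxOk matrix r_s c_s r_e c_e) := by unfold Pre_isSubBoxOk; infer_instance

def pvWitness_isSubBoxOk : List (List String) × Int × Int × Int × Int :=
  ([["1", "2"], ["3", "."]], 0, 0, 2, 2)

def Spec_isSubBoxOk (matrix : List (List String)) (r_s : Int) (c_s : Int) (r_e : Int) (c_e : Int) (out : Bool) : Prop := out = isSubBoxOk_alt matrix r_s c_s r_e c_e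
instance (matrix : List (List String)) (r_s : Int) (c_s : Int) (r_e : Int) (c_e : Int) (out : Bool) : Decidable (Spec_isSubBoxOk matrix r_s c_s r_e c_e out) := by unfold Spec_isSubBoxOk; infer_instance

-- ===== CLAIM (what is proved, stated in full; the proofs are below) =====
def Claim_equal_isSubBoxOk : Prop := ∀ (matrix : List (List String)) (r_s : Int) (c_s : Int) (r_e : Int) (c_e : Int), Dom_isSubBoxOk matrix r_s c_s r_e c_e → Pre_isSubBoxOk matrix r_s c_s r_e c_e → Spec_isSubBoxOk matrix r_s c_s r_e c_e (isSubBoxOk matrix r_s c_s r_e c_e)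

-- ===== LEMMAS AND PROOFS =====

-- proof-only helper: A's scan over the already-gathered (non-'.') value list
def scanVals (vs : List String) (d : PySem.Dict String Int) : Option (PySem.Dict String Int) :=
  match vs with
  | [] => some d
  | v :: vs' => if d.contains v then none else scanVals vs' (d.insert v 1)

-- values contributed by one row to A's scan (non-'.' only)
def rowVals (row : List String) (js : List Int) : List String :=
  js.filterMap (fun j =>
    let v := PySem.List.pyGetD row j "."
    if v ≠ "." then some v else none)

-- all cell values of a row, dots included
def rowValsAll (matrix : List (List String)) (i : Int) (js : List Int) : List String :=
  js.map (cellVal matrix i)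

-- all cell values of the rows strictly before row index i
def preVals (matrix : List (List String)) (r_s c_s c_e i : Int) : List String :=
  (PySem.List.pyRange r_s i 1).flatMap
    (fun p => rowValsAll matrix p (PySem.List.pyRange c_s c_e 1))

-- proof-only helper: B's decision re-expressed as a scan with an explicit prefix list
def chk (pre : List String) (vs : List String) : Bool :=
  match vs with
  | [] => true
  | v :: vs' => if (v != ".") && pre.contains v then false else chk (pre ++ [v]) vs'

theorem aInner_eq_scan (row : List String) (js : List Int) (d : PySem.Dict String Int) :
    aInner row js d = scanVals (rowVals row js) d := by
  induction js generalizing d with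
  | nil => rfl
  | cons j js' ih =>
    simp only [aInner, rowVals, List.filterMap_cons]
    by_cases h : PySem.List.pyGetD row j "." ≠ "."
    · rw [if_pos h, if_pos h]
      simp only [scanVals]
      by_cases hc : (d.contains (PySem.List.pyGetD row j ".")) = true
      · rw [if_pos hc, if_pos hc]
      · rw [if_neg hc, if_neg hc, ih]
        rfl
    · rw [if_neg h, if_neg h, ih]
      rfl

theorem scanVals_append (xs ys : List String) (d : PySem.Dict String Int) :
    scanVals (xs ++ ys) d = (scanVals xs d).bind (fun d' => scanVals ys d') := by
  induction xs generalizing d with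
  | nil => rfl
  | cons x xs ih =>
    simp only [List.cons_append, scanVals]
    by_cases hc : d.contains x = true
    · rw [if_pos hc, if_pos hc]; rfl
    · rw [if_neg hc, if_neg hc, ih]

theorem aOuter_eq_scan (matrix : List (List String)) (c_s c_e : Int) (is : List Int)
    (d : PySem.Dict String Int) :
    aOuter matrix c_s c_e is d =
      (scanVals (is.flatMap (fun i =>
        rowVals (PySem.List.pyGetD matrix i []) (PySem.List.pyRange c_s c_e 1))) d).isSome := by
  induction is generalizing d with
  | nil => rfl
  | cons i is' ih =>
    simp only [aOuter, List.flatMap_cons, scanVals_append, aInner_eq_scan]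
    cases h : scanVals (rowVals (PySem.List.pyGetD matrix i []) (PySem.List.pyRange c_s c_e 1)) d with
    | none => simp
    | some d' => simp [ih]

theorem scanVals_isSome (vs : List String) (d : PySem.Dict String Int) :
    (scanVals vs d).isSome = true ↔ vs.Nodup ∧ ∀ v ∈ vs, d.contains v = false := by
  induction vs generalizing d with
  | nil => simp [scanVals]
  | cons v vs' ih =>
    simp only [scanVals]
    by_cases hc : d.contains v = true
    · rw [if_pos hc]
      simp only [Option.isSome_none]
      constructor
      · intro h; exact absurd h (by simp)
      · rintro ⟨_, hall⟩
        have := hall v (List.mem_cons_self)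
        rw [hc] at this
        exact absurd this (by simp)
    · rw [if_neg hc]
      rw [ih, List.nodup_cons]
      constructor
      · rintro ⟨hnd, hall⟩
        refine ⟨⟨?_, hnd⟩, ?_⟩
        · intro hmem
          have := hall v hmem
          rw [PySem.Dict.contains_insert] at this
          simp at this
        · intro w hw
          rcases List.mem_cons.1 hw with hw | hw
          · subst hw; exact Bool.eq_false_iff.2 hc
          · have := hall w hw
            rw [PySem.Dict.contains_insert] at this
            simp at this
            exact this.2
      · rintro ⟨⟨hnm, hnd⟩, hall⟩
        refine ⟨hnd, ?_⟩
        intro w hw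
        rw [PySem.Dict.contains_insert]
        have hne : (w == v) = false := by
          simp only [beq_eq_false_iff_ne]
          rintro rfl; exact hnm hw
        rw [hne, hall w (List.mem_cons_of_mem _ hw)]
        rfl

-- A's per-row gathered values are just the dot-filtered cell values
theorem rowVals_eq_filter (matrix : List (List String)) (i : Int) (js : List Int) :
    rowVals (PySem.List.pyGetD matrix i []) js
      = (rowValsAll matrix i js).filter (fun v => v != ".") := by
  induction js with
  | nil => rfl
  | cons j js' ih =>
    simp only [rowVals, rowValsAll, List.filterMap_cons, List.map_cons, List.filter_cons] at *
    by_cases h : PySem.List.pyGetD (PySem.List.pyGetD matrix i []) j "." ≠ "."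
    · rw [if_pos h]
      have hb : (cellVal matrix i j != ".") = true := by
        simpa [cellVal, bne_iff_ne] using h
      rw [hb]
      simp only [ih]
      rfl
    · rw [if_neg h]
      have hb : (cellVal matrix i j != ".") = false := by
        simp only [ne_eq, not_not] at h
        simp [cellVal, h]
      rw [hb]
      exact ih

-- dup_before is membership of val in the values of the cells traversed earlier
theorem dupBefore_iff (matrix : List (List String)) (r_s c_s c_e i j : Int) (val : String)
    (hi : r_s ≤ i) :
    dupBefore matrix r_s c_s c_e i j val = true ↔
      val ∈ preVals matrix r_s c_s c_e i ++ rowValsAll matrix i (PySem.List.pyRange c_s j 1) := by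
  unfold dupBefore preVals rowValsAll
  simp only [List.any_eq_true, List.mem_append, List.mem_flatMap, List.mem_map,
    PySem.List.mem_pyRange_one, beq_iff_eq]
  constructor
  · rintro ⟨p, ⟨hp1, hp2⟩, q, ⟨hq1, hq2⟩, hval⟩
    by_cases hpi : p < i
    · rw [if_pos hpi] at hq2
      exact Or.inl ⟨p, ⟨hp1, hpi⟩, q, ⟨hq1, hq2⟩, hval⟩
    · rw [if_neg hpi] at hq2
      have hpeq : p = i := by omega
      subst hpeq
      exact Or.inr ⟨q, ⟨hq1, hq2⟩, hval⟩
  · rintro (⟨p, ⟨hp1, hp2⟩, q, ⟨hq1, hq2⟩, hval⟩ | ⟨q, ⟨hq1, hq2⟩, hval⟩)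
    · exact ⟨p, ⟨hp1, by omega⟩, q, ⟨hq1, by rw [if_pos hp2]; exact hq2⟩, hval⟩
    · exact ⟨i, ⟨hi, by omega⟩, q, ⟨hq1, by rw [if_neg (lt_irrefl i)]; exact hq2⟩, hval⟩

theorem dupBefore_eq_contains (matrix : List (List String)) (r_s c_s c_e i j : Int) (val : String)
    (hi : r_s ≤ i) :
    dupBefore matrix r_s c_s c_e i j val =
      (preVals matrix r_s c_s c_e i ++ rowValsAll matrix i (PySem.List.pyRange c_s j 1)).contains val := by
  rw [Bool.eq_iff_iff, dupBefore_iff matrix r_s c_s c_e i j val hi]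
  simp

-- B's inner loop from column j equals chk with the earlier cells as prefix
theorem inner_eq (matrix : List (List String)) (r_s c_s c_e i : Int) (hi : r_s ≤ i) :
    ∀ (n : Nat) (j : Int), c_s ≤ j → (c_e - j).toNat = n →
      bInner matrix r_s c_s c_e i (PySem.List.pyRange j c_e 1)
        = chk (preVals matrix r_s c_s c_e i ++ rowValsAll matrix i (PySem.List.pyRange c_s j 1))
              (rowValsAll matrix i (PySem.List.pyRange j c_e 1)) := by
  intro n
  induction n with
  | zero =>
    intro j hj hn
    have hend : c_e ≤ j := by omega
    rw [PySem.List.pyRange_one_eq_nil hend]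
    rfl
  | succ n ih =>
    intro j hj hn
    have hlt : j < c_e := by omega
    rw [PySem.List.pyRange_one_cons hlt]
    have hcons : rowValsAll matrix i (j :: PySem.List.pyRange (j + 1) c_e 1)
        = cellVal matrix i j :: rowValsAll matrix i (PySem.List.pyRange (j + 1) c_e 1) := rfl
    rw [hcons]
    simp only [bInner, chk]
    rw [← dupBefore_eq_contains matrix r_s c_s c_e i j (cellVal matrix i j) hi]
    by_cases hcond : ((cellVal matrix i j != ".") && dupBefore matrix r_s c_s c_e i j (cellVal matrix i j)) = true
    · rw [if_pos hcond, if_pos hcond]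
    · rw [if_neg hcond, if_neg hcond]
      rw [ih (j + 1) (by omega) (by omega)]
      have hsnoc : rowValsAll matrix i (PySem.List.pyRange c_s (j + 1) 1)
          = rowValsAll matrix i (PySem.List.pyRange c_s j 1) ++ [cellVal matrix i j] := by
        rw [PySem.List.pyRange_one_succ_right hj]
        simp [rowValsAll]
      rw [hsnoc, ← List.append_assoc]

-- chk splits over an append of the remaining values
theorem chk_append (xs ys pre : List String) :
    chk pre (xs ++ ys) = (chk pre xs && chk (pre ++ xs) ys) := by
  induction xs generalizing pre with
  | nil => simp [chk]
  | cons x xs ih =>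
    simp only [List.cons_append, chk]
    by_cases hc : ((x != ".") && pre.contains x) = true
    · rw [if_pos hc, if_pos hc]
      simp
    · rw [if_neg hc, if_neg hc, ih]
      simp [List.append_assoc]

-- B's outer loop from row i equals chk over the flattened remaining rows
theorem outer_eq (matrix : List (List String)) (r_s c_s c_e r_e : Int) :
    ∀ (n : Nat) (i : Int), r_s ≤ i → (r_e - i).toNat = n →
      bOuter matrix r_s c_s c_e (PySem.List.pyRange i r_e 1)
        = chk (preVals matrix r_s c_s c_e i)
              ((PySem.List.pyRange i r_e 1).flatMap
                (fun p => rowValsAll matrix p (PySem.List.pyRange c_s c_e 1))) := by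
  intro n
  induction n with
  | zero =>
    intro i hi hn
    have hend : r_e ≤ i := by omega
    rw [PySem.List.pyRange_one_eq_nil hend]
    rfl
  | succ n ih =>
    intro i hi hn
    have hlt : i < r_e := by omega
    rw [PySem.List.pyRange_one_cons hlt]
    simp only [bOuter, List.flatMap_cons]
    rw [chk_append]
    have hin := inner_eq matrix r_s c_s c_e i hi ((c_e - c_s).toNat) c_s le_rfl rfl
    have hnil : rowValsAll matrix i (PySem.List.pyRange c_s c_s 1) = [] := by
      rw [PySem.List.pyRange_one_eq_nil (le_refl c_s)]; rfl
    rw [hnil, List.append_nil] at hin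
    rw [hin]
    have hpre : preVals matrix r_s c_s c_e (i + 1)
        = preVals matrix r_s c_s c_e i ++ rowValsAll matrix i (PySem.List.pyRange c_s c_e 1) := by
      unfold preVals
      rw [PySem.List.pyRange_one_succ_right hi]
      simp
    rw [ih (i + 1) (by omega) (by omega), hpre]
    by_cases hrow : chk (preVals matrix r_s c_s c_e i)
        (rowValsAll matrix i (PySem.List.pyRange c_s c_e 1)) = true
    · rw [if_pos hrow, hrow, Bool.true_and]
    · rw [if_neg hrow, Bool.eq_false_iff.2 hrow, Bool.false_and]

-- chk decides Nodup of the dot-filtered values, relative to the prefix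
theorem chk_iff (vs : List String) : ∀ (pre : List String),
    chk pre vs = true ↔
      (vs.filter (fun v => v != ".")).Nodup ∧
        ∀ v ∈ vs.filter (fun v => v != "."), pre.contains v = false := by
  induction vs with
  | nil => intro pre; simp [chk]
  | cons v vs' ih =>
    intro pre
    simp only [chk]
    by_cases hv : (v != ".") = true
    · rw [show List.filter (fun v => v != ".") (v :: vs') = v :: List.filter (fun v => v != ".") vs' by
        simp [hv]]
      by_cases hc : pre.contains v = true
      · rw [if_pos (by rw [hv, hc]; rfl)]
        simp only [Bool.false_eq_true, false_iff, not_and]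
        intro _ hall
        have := hall v List.mem_cons_self
        rw [hc] at this
        exact absurd this (by simp)
      · rw [if_neg (by rw [hv]; simpa using hc)]
        rw [ih (pre ++ [v]), List.nodup_cons]
        constructor
        · rintro ⟨hnd, hall⟩
          refine ⟨⟨?_, hnd⟩, ?_⟩
          · intro hmem
            have := hall v hmem
            simp at this
          · intro w hw
            rcases List.mem_cons.1 hw with hw | hw
            · subst hw; exact Bool.eq_false_iff.2 hc
            · have := hall w hw
              simp only [List.contains_append, Bool.or_eq_false_iff] at this
              exact this.1
        · rintro ⟨⟨hnm, hnd⟩, hall⟩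
          refine ⟨hnd, ?_⟩
          intro w hw
          simp only [List.contains_append, Bool.or_eq_false_iff]
          refine ⟨hall w (List.mem_cons_of_mem _ hw), ?_⟩
          simp only [List.contains_cons, List.contains_nil, Bool.or_eq_false_iff]
          refine ⟨?_, trivial⟩
          simp only [beq_eq_false_iff_ne]
          rintro rfl
          exact hnm hw
    · have hvd : v = "." := by simpa using hv
      rw [show List.filter (fun v => v != ".") (v :: vs') = List.filter (fun v => v != ".") vs' by
        simp [hv], if_neg (by simp [hv])]
      rw [ih (pre ++ [v])]
      constructor
      · rintro ⟨hnd, hall⟩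
        refine ⟨hnd, ?_⟩
        intro w hw
        have := hall w hw
        simp only [List.contains_append, Bool.or_eq_false_iff] at this
        exact this.1
      · rintro ⟨hnd, hall⟩
        refine ⟨hnd, ?_⟩
        intro w hw
        simp only [List.contains_append, Bool.or_eq_false_iff]
        refine ⟨hall w hw, ?_⟩
        have hwne : (w != ".") = true := (List.mem_filter.1 hw).2
        simp only [List.contains_cons, List.contains_nil, Bool.or_eq_false_iff]
        refine ⟨?_, trivial⟩
        simp only [beq_eq_false_iff_ne]
        rintro rfl
        simp [hvd] at hwne

-- ===== VERDICT (by name: the statement is the Claim_ definition above) =====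
theorem isSubBoxOk_spec : Claim_equal_isSubBoxOk := by
  intro matrix r_s c_s r_e c_e _ _
  unfold Spec_isSubBoxOk isSubBoxOk isSubBoxOk_alt
  set allVals := (PySem.List.pyRange r_s r_e 1).flatMap
    (fun p => rowValsAll matrix p (PySem.List.pyRange c_s c_e 1)) with hall
  have hfilterflat : (PySem.List.pyRange r_s r_e 1).flatMap (fun i =>
      rowVals (PySem.List.pyGetD matrix i []) (PySem.List.pyRange c_s c_e 1))
      = allVals.filter (fun v => v != ".") := by
    rw [hall, List.filter_flatMap]
    exact List.flatMap_congr (fun i _ => rowVals_eq_filter matrix i (PySem.List.pyRange c_s c_e 1))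
  have hA : aOuter matrix c_s c_e (PySem.List.pyRange r_s r_e 1) PySem.Dict.empty = true ↔
      (allVals.filter (fun v => v != ".")).Nodup := by
    rw [aOuter_eq_scan, hfilterflat, scanVals_isSome]
    simp [PySem.Dict.contains_empty]
  have hB : bOuter matrix r_s c_s c_e (PySem.List.pyRange r_s r_e 1) = true ↔
      (allVals.filter (fun v => v != ".")).Nodup := by
    have h := outer_eq matrix r_s c_s c_e r_e ((r_e - r_s).toNat) r_s le_rfl rfl
    have hpre0 : preVals matrix r_s c_s c_e r_s = [] := by
      unfold preVals
      rw [PySem.List.pyRange_one_eq_nil (le_refl r_s)]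
      rfl
    rw [h, hpre0, ← hall, chk_iff]
    simp
  rw [Bool.eq_iff_iff, hA, hB]
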